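-- pv_equiv track=rewrite | github.com/cyeonho/my_grandma_recipe | parser.py | split_ab_pairs
-- ===== SOURCE A (Python) =====
-- def split_ab_pairs(row: list[str]) -> list[list[str]]:
--     """
--     Given one STELLAR_AB line, return a list with one new row
--     per successive (A B) or (B A) pair.  Any incomplete tail
--     (odd number of frames) is discarded.
--     """
--     obsids      = row[6].split()         # OBSIDS column
--     frametypes  = row[7].split()         # FRAMETYPES column
--     out         = []
--
--     for i in range(0, min(len(obsids), len(frametypes)), 2):
--         if i + 1 >= len(obsids):          # orphan at end
--             break
--         pair_ids   = obsids[i:i+2]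
--         pair_types = frametypes[i:i+2]
--         pattern    = " ".join(pair_types)
--
--         if pattern not in ("A B", "B A"):  # ignore strange cases
--             continue
--
--         new_row = row.copy()
--         new_row[2] = pair_ids[0]              # GROUP1 ยกรฆ first OBSID
--         new_row[6] = " ".join(pair_ids)       # OBSIDS   (two only)
--         new_row[7] = pattern                  # FRAMETYPES as "A B"
--         out.append(new_row)
--
--     return out
-- ===== SOURCE B (Python) =====
-- def split_ab_pairs(row: list[str]) -> list[list[str]]:
--     """Structural recursion on the two token lists: consume two leading
--     tokens of each per step and cons the produced row onto the recursively
--     built tail (no index arithmetic, no accumulator, output built back-to-front)."""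
--     def emit(obsids, frametypes):
--         if len(obsids) < 2 or len(frametypes) < 2:
--             return []          # base: nothing left to pair (orphans discarded)
--         tail = emit(obsids[2:], frametypes[2:])
--         pattern = " ".join(frametypes[:2])
--         if pattern not in ("A B", "B A"):
--             return tail
--         new_row = row.copy()
--         new_row[2] = obsids[0]
--         new_row[6] = " ".join(obsids[:2])
--         new_row[7] = pattern
--         return [new_row] + tail
--     return emit(row[6].split(), row[7].split())
-- ===== Notes on version B (the rewrite author's own statement) =====
-- stated objective: alternative
-- what changed: Replaces A's index loop (range with step 2, break/continue, per-index slicing, accumulator append) by a recursive helper over the two token lists that consumes two leading tokens per step and builds the output back-to-front by consing onto the recursively built tail; the base case (fewer than two tokens left in either list) subsumes A's orphan-tail break and short-FRAMETYPES skip.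
-- outside the precondition, e.g. on split_ab_pairs(['a', 'b', 'c']): A raises IndexError, B raises IndexError
import Mathlib
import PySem

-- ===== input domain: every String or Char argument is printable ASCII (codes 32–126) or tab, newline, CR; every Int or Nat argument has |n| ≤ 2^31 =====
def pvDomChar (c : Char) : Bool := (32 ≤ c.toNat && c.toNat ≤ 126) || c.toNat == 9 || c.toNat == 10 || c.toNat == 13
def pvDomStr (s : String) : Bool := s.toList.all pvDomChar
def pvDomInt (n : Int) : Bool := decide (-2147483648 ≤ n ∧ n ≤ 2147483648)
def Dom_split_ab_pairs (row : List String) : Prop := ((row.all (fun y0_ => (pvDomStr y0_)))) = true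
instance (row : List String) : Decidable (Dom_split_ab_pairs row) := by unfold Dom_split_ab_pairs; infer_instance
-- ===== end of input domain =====

-- B replaces A's index loop (break/continue, slicing, accumulator) by structural recursion
-- on the two token lists, consing each produced row onto the recursively built tail; objective: alternative (same linear cost).


-- ===== PORT A =====
-- the for-loop: i runs over range(0, stop, 2), with the break and continue of A
def splitAbLoop (row obsids frametypes : List String) (stop : Nat) (i : Nat)
    (out : List (List String)) : List (List String) :=
  if _h : i < stop then
    if obsids.length ≤ i + 1 then out          -- orphan at end: break
    else
      let pair_ids := PySem.List.slice obsids (some (i : Int)) (some ((i : Int) + 2))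
      let pair_types := PySem.List.slice frametypes (some (i : Int)) (some ((i : Int) + 2))
      let pattern := PySem.Str.join " " pair_types
      if pattern = "A B" ∨ pattern = "B A" then
        splitAbLoop row obsids frametypes stop (i + 2)
          (out ++ [PySem.List.pySetD
                    (PySem.List.pySetD
                      (PySem.List.pySetD row 2 (PySem.List.pyGetD pair_ids 0 ""))
                      6 (PySem.Str.join " " pair_ids))
                    7 pattern])
      else
        splitAbLoop row obsids frametypes stop (i + 2) out   -- ignore strange cases: continue
  else out
termination_by stop - i

def split_ab_pairs (row : List String) : List (List String) :=
  let obsids := PySem.Str.split₀ (PySem.List.pyGetD row 6 "")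
  let frametypes := PySem.Str.split₀ (PySem.List.pyGetD row 7 "")
  splitAbLoop row obsids frametypes (min obsids.length frametypes.length) 0 []

-- ===== PORT B =====
-- emit: consume two leading tokens of each list per step; the tail of the output is
-- built by the recursive call first, then the current row (if the pattern fits) is consed on
def splitAbEmit (row : List String) : List String → List String → List (List String)
  | a :: b :: o, t :: u :: f =>
      let tail := splitAbEmit row o f
      let pattern := PySem.Str.join " " [t, u]
      if pattern = "A B" ∨ pattern = "B A" then
        (PySem.List.pySetD
          (PySem.List.pySetD (PySem.List.pySetD row 2 a) 6 (PySem.Str.join " " [a, b]))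
          7 pattern) :: tail
      else tail
  | _, _ => []           -- base: fewer than two tokens left in either list

def split_ab_pairs_alt (row : List String) : List (List String) :=
  splitAbEmit row (PySem.Str.split₀ (PySem.List.pyGetD row 6 ""))
                  (PySem.Str.split₀ (PySem.List.pyGetD row 7 ""))

-- ===== PRECONDITION & SPEC =====
-- A raises IndexError reading row[7] (and row[6]) when the row has fewer than 8 columns
def Pre_split_ab_pairs (row : List String) : Prop := 8 ≤ row.length
instance (row : List String) : Decidable (Pre_split_ab_pairs row) := by
  unfold Pre_split_ab_pairs; infer_instance

def pvWitness_split_ab_pairs : List String :=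
  ["STELLAR_AB", "1", "g", "t", "u", "v", "o1 o2 o3 o4", "A B B A"]

def Spec_split_ab_pairs (row : List String) (out : List (List String)) : Prop :=
  out = split_ab_pairs_alt row
instance (row : List String) (out : List (List String)) : Decidable (Spec_split_ab_pairs row out) := by
  unfold Spec_split_ab_pairs; infer_instance

-- ===== CLAIM (what is proved, stated in full; the proofs are below) =====
def Claim_equal_split_ab_pairs : Prop :=
  ∀ (row : List String), Dom_split_ab_pairs row → Pre_split_ab_pairs row →
    Spec_split_ab_pairs row (split_ab_pairs row)

-- ===== LEMMAS AND PROOFS =====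

-- every character of every token of Python's s.split() is non-whitespace
lemma split₀_go_no_space (s : List Char) : ∀ (cur : List Char) (acc : List (List Char)),
    (∀ c ∈ cur, PySem.Chars.isspace c = false) →
    (∀ t ∈ acc, ∀ c ∈ t, PySem.Chars.isspace c = false) →
    ∀ t ∈ PySem.Chars.split₀.go s cur acc, ∀ c ∈ t, PySem.Chars.isspace c = false := by
  induction s with
  | nil =>
      intro cur acc hcur hacc t ht
      simp only [PySem.Chars.split₀.go] at ht
      split at ht
      · exact hacc t (by simpa using ht)
      · rcases (by simpa using ht : t ∈ acc ∨ t = cur.reverse) with h | h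
        · exact hacc t h
        · subst h; intro c hc; exact hcur c (by simpa using hc)
  | cons c rest ih =>
      intro cur acc hcur hacc t ht
      simp only [PySem.Chars.split₀.go] at ht
      split at ht
      · split at ht
        · exact ih [] acc (by simp) hacc t ht
        · refine ih [] (cur.reverse :: acc) (by simp) ?_ t ht
          intro u hu
          rcases List.mem_cons.mp hu with h | h
          · subst h; intro d hd; exact hcur d (by simpa using hd)
          · exact hacc u h
      · rename_i hsp
        refine ih (c :: cur) acc ?_ hacc t ht
        intro d hd
        rcases (by simpa using hd : d = c ∨ d ∈ cur) with h | h
        · subst h; simpa using hsp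
        · exact hcur d h

lemma token_no_space (s t : String) (ht : t ∈ PySem.Str.split₀ s) :
    ∀ c ∈ t.toList, PySem.Chars.isspace c = false := by
  have h : t.toList ∈ PySem.Chars.split₀ s.toList := by
    rw [← PySem.Str.split₀_map_toList]
    exact List.mem_map_of_mem ht
  exact split₀_go_no_space s.toList [] [] (by simp) (by simp) t.toList
    (by simpa [PySem.Chars.split₀] using h)

lemma token_ne_pattern (s t : String) (ht : t ∈ PySem.Str.split₀ s) :
    t ≠ "A B" ∧ t ≠ "B A" := by
  have h := token_no_space s t ht
  constructor <;>
  · intro he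
    have := h ' ' (by rw [he]; decide)
    simp [show PySem.Chars.isspace ' ' = true from by decide] at this

-- " ".join of a single token is the token itself
lemma join_singleton (t : String) : PySem.Str.join " " [t] = t := by
  apply String.toList_injective
  rw [show (PySem.Str.join " " [t]).toList
        = PySem.Chars.join " ".toList ([t].map String.toList) from PySem.Str.toList_join _ _]
  simp [PySem.Chars.join_singleton]

-- B's recursion returns [] as soon as either token list has fewer than two elements
lemma splitAbEmit_short (row : List String) (xs ys : List String)
    (h : xs.length ≤ 1 ∨ ys.length ≤ 1) : splitAbEmit row xs ys = [] := by
  match xs, ys with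
  | [], _ => rfl
  | [_], _ => rfl
  | _ :: _ :: _, [] => rfl
  | _ :: _ :: _, [_] => rfl
  | _ :: _ :: _, _ :: _ :: _ => simp at h

-- the core correspondence: the index loop from i equals B's recursion on the lists with i tokens dropped
lemma loop_eq_emit (row : List String) (s7 : String) (o f : List String)
    (hf : f = PySem.Str.split₀ s7) :
    ∀ (k i : Nat) (out : List (List String)), min o.length f.length - i ≤ k →
      splitAbLoop row o f (min o.length f.length) i out
        = out ++ splitAbEmit row (o.drop i) (f.drop i) := by
  intro k
  induction k with
  | zero =>
      intro i out h
      have hi : min o.length f.length ≤ i := by omega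
      rw [splitAbLoop, dif_neg (by omega : ¬ i < min o.length f.length)]
      rw [splitAbEmit_short row _ _ (by
        rcases (by omega : o.length ≤ i ∨ f.length ≤ i) with h' | h' <;>
          [left; right] <;> simp only [List.length_drop] <;> omega)]
      simp
  | succ k ih =>
      intro i out h
      by_cases hi : i < min o.length f.length
      · have hio : i < o.length := by omega
        have hif : i < f.length := by omega
        rw [splitAbLoop, dif_pos hi]
        by_cases horph : o.length ≤ i + 1
        · -- break: at most one obsid remains, B's base case fires
          simp only [if_pos horph]
          rw [splitAbEmit_short row _ _ (by left; simp only [List.length_drop]; omega)]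
          simp
        · simp only [if_neg horph]
          have hio1 : i + 1 < o.length := by omega
          have hslo : PySem.List.slice o (some (i : Int)) (some ((i : Int) + 2))
              = [o[i], o[i + 1]] := by
            rw [show ((i : Int) + 2) = ((i : Int) + ((2 : Nat) : Int)) by push_cast; ring,
                PySem.List.slice_natCast_add]
            rw [List.drop_eq_getElem_cons hio, List.drop_eq_getElem_cons hio1]
            rfl
          by_cases hif1 : i + 1 < f.length
          · -- a full pair on both sides
            have hslf : PySem.List.slice f (some (i : Int)) (some ((i : Int) + 2))
                = [f[i], f[i + 1]] := by
              rw [show ((i : Int) + 2) = ((i : Int) + ((2 : Nat) : Int)) by push_cast; ring,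
                  PySem.List.slice_natCast_add]
              rw [List.drop_eq_getElem_cons hif, List.drop_eq_getElem_cons hif1]
              rfl
            have hdo : o.drop i = o[i] :: o[i + 1] :: o.drop (i + 2) := by
              rw [List.drop_eq_getElem_cons hio, List.drop_eq_getElem_cons hio1]
            have hdf : f.drop i = f[i] :: f[i + 1] :: f.drop (i + 2) := by
              rw [List.drop_eq_getElem_cons hif, List.drop_eq_getElem_cons hif1]
            rw [hdo, hdf, hslo, hslf]
            simp only [splitAbEmit]
            split
            · rw [ih (i + 2) _ (by omega)]
              simp [PySem.List.pyGetD]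
            · exact ih (i + 2) out (by omega)
          · -- frametypes runs out: A's slice is a single token, never "A B"/"B A"; B's base case fires
            have hif2 : i + 1 = f.length := by omega
            have hslf : PySem.List.slice f (some (i : Int)) (some ((i : Int) + 2))
                = [f[i]] := by
              rw [show ((i : Int) + 2) = ((i : Int) + ((2 : Nat) : Int)) by push_cast; ring,
                  PySem.List.slice_natCast_add]
              rw [List.drop_eq_getElem_cons hif, List.drop_eq_nil_of_le (by omega)]
              rfl
            rw [hslf, join_singleton]
            have hne := token_ne_pattern s7 f[i] (by rw [← hf]; exact List.getElem_mem hif)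
            rw [if_neg (by tauto)]
            rw [splitAbLoop, dif_neg (by omega : ¬ i + 2 < min o.length f.length)]
            rw [splitAbEmit_short row _ _ (by right; simp only [List.length_drop]; omega)]
            simp
      · rw [splitAbLoop, dif_neg hi]
        rw [splitAbEmit_short row _ _ (by
          rcases (by omega : o.length ≤ i ∨ f.length ≤ i) with h' | h' <;>
            [left; right] <;> simp only [List.length_drop] <;> omega)]
        simp

-- ===== VERDICT (by name: the statement is the Claim_ definition above) =====
theorem split_ab_pairs_spec : Claim_equal_split_ab_pairs := by
  intro row _ _
  unfold Spec_split_ab_pairs split_ab_pairs split_ab_pairs_alt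
  simpa using loop_eq_emit row (PySem.List.pyGetD row 7 "") _ _ rfl _ 0 [] (le_refl _)
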